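-- pv_equiv track=rewrite | github.com/Naman-Singla777/DS-Algo | Consecutive Ones.py | solve
-- ===== SOURCE A (Python) =====
-- def solve(nums):
--     if nums.count(1) == 1:
--         return True
--     c = 1
--     mc = 0
--     for i in range(len(nums)-1):
--         if nums[i] == nums[i+1] == 1:
--             c+=1
--             if c > mc:
--                 mc = c
--         else:
--             c = 1
--     return mc == nums.count(1)
-- ===== SOURCE B (Python) =====
-- def solve(nums):
--     groups = 0
--     prev = 0
--     for x in nums:
--         if x == 1 and prev != 1:
--             groups += 1
--         prev = x
--     return groups <= 1
-- ===== Notes on version B (the rewrite author's own statement) =====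
-- stated objective: simpler
-- what changed: B counts the number of maximal blocks of consecutive 1s in one pass (increment on a non-1-to-1 transition) and returns groups <= 1, instead of A's index loop tracking the longest 1-run and comparing it against two count(1) scans.
import Mathlib
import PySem

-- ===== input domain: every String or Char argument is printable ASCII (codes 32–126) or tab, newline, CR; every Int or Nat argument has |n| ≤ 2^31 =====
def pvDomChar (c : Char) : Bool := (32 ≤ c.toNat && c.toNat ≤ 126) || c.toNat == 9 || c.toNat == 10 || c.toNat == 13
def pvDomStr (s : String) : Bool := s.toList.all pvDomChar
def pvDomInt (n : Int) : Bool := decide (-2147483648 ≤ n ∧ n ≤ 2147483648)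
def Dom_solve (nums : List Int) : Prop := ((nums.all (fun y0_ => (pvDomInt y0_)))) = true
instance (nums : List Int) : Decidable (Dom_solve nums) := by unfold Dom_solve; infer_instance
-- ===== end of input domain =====

-- B replaces A's longest-1-run-vs-count(1) comparison by a single pass counting maximal blocks
-- of consecutive 1s and returning (blocks ≤ 1): simpler, one scan instead of three.

-- ===== PORT A =====
def solve (nums : List Int) : Bool :=
  if nums.count 1 == 1 then
    true
  else
    let r := (PySem.List.pyRange 0 ((nums.length : Int) - 1) 1).foldl
      (fun (s : Int × Int) i =>
        if PySem.List.pyGetD nums i 0 == 1 && PySem.List.pyGetD nums (i + 1) 0 == 1 then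
          (s.1 + 1, if s.1 + 1 > s.2 then s.1 + 1 else s.2)
        else
          (1, s.2))
      (1, 0)
    r.2 == (nums.count 1 : Int)

-- ===== PORT B =====
def solve_alt (nums : List Int) : Bool :=
  let s := nums.foldl
    (fun (s : Int × Int) x =>
      (if x == 1 && !(s.2 == 1) then s.1 + 1 else s.1, x))
    (0, 0)
  s.1 ≤ 1

-- ===== PRECONDITION & SPEC =====
def Spec_solve (nums : List Int) (out : Bool) : Prop := out = solve_alt nums
instance (nums : List Int) (out : Bool) : Decidable (Spec_solve nums out) := by unfold Spec_solve; infer_instance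

-- ===== CLAIM (what is proved, stated in full; the proofs are below) =====
def Claim_equal_solve : Prop := ∀ (nums : List Int), Dom_solve nums → Spec_solve nums (solve nums)

-- ===== LEMMAS AND PROOFS =====

-- A's loop state as a function of the list it has scanned
def afold (nums : List Int) : Int × Int :=
  (PySem.List.pyRange 0 ((nums.length : Int) - 1) 1).foldl
    (fun (s : Int × Int) i =>
      if PySem.List.pyGetD nums i 0 == 1 && PySem.List.pyGetD nums (i + 1) 0 == 1 then
        (s.1 + 1, if s.1 + 1 > s.2 then s.1 + 1 else s.2)
      else
        (1, s.2))
    (1, 0)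

-- B's loop state
def bfold (nums : List Int) : Int × Int :=
  nums.foldl
    (fun (s : Int × Int) x =>
      (if x == 1 && !(s.2 == 1) then s.1 + 1 else s.1, x))
    (0, 0)

-- length of the trailing run of 1s
def trailOnes (l : List Int) : Nat := (l.reverse.takeWhile (· == 1)).length

lemma solve_eq (nums : List Int) :
    solve nums = ((nums.count 1 == 1) || ((afold nums).2 == (nums.count 1 : Int))) := by
  unfold solve afold
  by_cases h : nums.count 1 == 1 <;> simp [h]

lemma solve_alt_eq (nums : List Int) :
    solve_alt nums = decide ((bfold nums).1 ≤ 1) := by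
  rfl

lemma trailOnes_append (l : List Int) (x : Int) :
    trailOnes (l ++ [x]) = if x = 1 then trailOnes l + 1 else 0 := by
  unfold trailOnes
  by_cases hx : x = 1 <;> simp [hx]

lemma bfold_append (l : List Int) (x : Int) :
    bfold (l ++ [x]) =
      (if x == 1 && !((bfold l).2 == 1) then (bfold l).1 + 1 else (bfold l).1, x) := by
  unfold bfold
  simp [List.foldl_append]

lemma afold_nil : afold [] = (1, 0) := by decide

lemma afold_singleton (x : Int) : afold [x] = (1, 0) := by
  unfold afold
  simp

lemma afold_append (l : List Int) (x : Int) (hl : l ≠ []) :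
    afold (l ++ [x]) =
      (if l.getLast hl == 1 && x == 1 then
        ((afold l).1 + 1,
          if (afold l).1 + 1 > (afold l).2 then (afold l).1 + 1 else (afold l).2)
      else (1, (afold l).2)) := by
  have hlen : 1 ≤ l.length := List.length_pos_iff.mpr hl
  unfold afold
  have h1 : ((l ++ [x]).length : Int) - 1 = ((l.length : Int) - 1) + 1 := by
    simp
  rw [h1, PySem.List.pyRange_one_succ_right (a := 0) (b := (l.length : Int) - 1) (by omega),
      List.foldl_append]
  have hcongr :
      (PySem.List.pyRange 0 ((l.length : Int) - 1) 1).foldl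
        (fun (s : Int × Int) i =>
          if PySem.List.pyGetD (l ++ [x]) i 0 == 1 && PySem.List.pyGetD (l ++ [x]) (i + 1) 0 == 1 then
            (s.1 + 1, if s.1 + 1 > s.2 then s.1 + 1 else s.2)
          else (1, s.2)) (1, 0)
      = (PySem.List.pyRange 0 ((l.length : Int) - 1) 1).foldl
        (fun (s : Int × Int) i =>
          if PySem.List.pyGetD l i 0 == 1 && PySem.List.pyGetD l (i + 1) 0 == 1 then
            (s.1 + 1, if s.1 + 1 > s.2 then s.1 + 1 else s.2)
          else (1, s.2)) (1, 0) := by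
    apply PySem.List.foldl_congr_mem
    intro acc i hi
    rw [PySem.List.mem_pyRange_one] at hi
    have e1 : PySem.List.pyGetD (l ++ [x]) i 0 = PySem.List.pyGetD l i 0 := by
      rw [PySem.List.pyGetD_eq_getElem (l ++ [x]) 0 (by omega) (by simp; omega),
          PySem.List.pyGetD_eq_getElem l 0 (by omega) (by omega)]
      exact List.getElem_append_left (by omega)
    have e2 : PySem.List.pyGetD (l ++ [x]) (i + 1) 0 = PySem.List.pyGetD l (i + 1) 0 := by
      rw [PySem.List.pyGetD_eq_getElem (l ++ [x]) 0 (by omega) (by simp; omega),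
          PySem.List.pyGetD_eq_getElem l 0 (by omega) (by omega)]
      exact List.getElem_append_left (by omega)
    rw [e1, e2]
  have eA : PySem.List.pyGetD (l ++ [x]) ((l.length : Int) - 1) 0 = l.getLast hl := by
    have hidx : ((l.length : Int) - 1).toNat = l.length - 1 := by omega
    rw [PySem.List.pyGetD_eq_getElem (l ++ [x]) 0 (by omega) (by simp)]
    simp only [hidx]
    rw [List.getElem_append_left (by omega), List.getLast_eq_getElem]
  have eB : PySem.List.pyGetD (l ++ [x]) ((l.length : Int) - 1 + 1) 0 = x := by
    have h2 : (l.length : Int) - 1 + 1 = (l.length : Int) := by omega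
    rw [h2, PySem.List.pyGetD_eq_getElem (l ++ [x]) 0 (by omega) (by simp)]
    simp
  rw [hcongr]
  simp only [List.foldl_cons, List.foldl_nil]
  rw [eA, eB]

lemma getLast_eq_one_iff_trail (l : List Int) (hl : l ≠ []) :
    (l.getLast hl = 1) ↔ 0 < trailOnes l := by
  unfold trailOnes
  rcases h : l.reverse with _ | ⟨a, t⟩
  · exact absurd (by simpa using congrArg List.reverse h) hl
  · have ha : l.getLast hl = a := by
      have := List.head_reverse (l := l)
      simp [h] at this
      exact this.symm
    by_cases h1 : a = 1 <;> simp [ha, h1]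

-- The loop invariant as pure arithmetic over the two states (c, mc), (g, prev),
-- the number cnt of 1s scanned and the trailing-run length t.
def InvP (c mc g prev : Int) (cnt t : Nat) : Prop :=
  c = max (t : Int) 1 ∧
  ((prev = 1) ↔ 0 < t) ∧
  t ≤ cnt ∧
  0 ≤ g ∧ g ≤ (cnt : Int) ∧
  (g = 0 → cnt = 0 ∧ mc = 0) ∧
  (g = 1 → ((cnt = 1 ∧ mc = 0) ∨ mc = (cnt : Int))) ∧
  (2 ≤ g → mc < (cnt : Int) ∧ 2 ≤ cnt) ∧
  (0 < t → (g ≤ 1 → t = cnt) ∧ (t : Int) + g ≤ (cnt : Int) + 1)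

lemma InvP_step (c mc g prev lastv x : Int) (cnt t : Nat)
    (hlast : lastv = 1 ↔ prev = 1)
    (h : InvP c mc g prev cnt t) :
    InvP (if lastv == 1 && x == 1 then (c + 1, if c + 1 > mc then c + 1 else mc) else (1, mc)).1
      (if lastv == 1 && x == 1 then (c + 1, if c + 1 > mc then c + 1 else mc) else (1, mc)).2
      ((if x == 1 && !(prev == 1) then g + 1 else g, x)).1
      ((if x == 1 && !(prev == 1) then g + 1 else g, x)).2
      (cnt + if x = 1 then 1 else 0)
      (if x = 1 then t + 1 else 0) := by
  unfold InvP at h ⊢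
  obtain ⟨hc, hprev, ht, hg0le, hgle, hg0, hg1, hg2, htp⟩ := h
  by_cases hx : x = 1 <;> by_cases hp : prev = 1
  · -- x = 1, prev = 1 : extend the trailing run
    have hl1 : lastv = 1 := hlast.mpr hp
    have htpos : 0 < t := hprev.mp hp
    have hgpos : 1 ≤ g := by
      by_contra hcon
      have hz := hg0 (by omega)
      omega
    have htfacts := htp htpos
    by_cases hgt : c + 1 > mc <;>
      simp only [hx, hl1, hp, hgt, beq_self_eq_true, Bool.and_self, if_true, if_false,
        Bool.not_true, Bool.and_false, Bool.false_eq_true] <;>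
    · refine ⟨by omega, by simp, by omega, by omega, by push_cast; omega, by omega, ?_, ?_, ?_⟩
      · intro h1
        rcases hg1 h1 with ⟨hc1, hm0⟩ | hmeq <;>
          [ (right; push_cast; omega) ; (right; push_cast at *; omega) ]
      · intro h2
        have := hg2 h2
        push_cast at *
        omega
      · intro _
        refine ⟨fun hle => by push_cast at *; omega, by push_cast at *; omega⟩
  · -- x = 1, prev ≠ 1 : a new block of 1s starts
    have hl1 : lastv ≠ 1 := fun h => hp (hlast.mp h)
    have htz : t = 0 := by
      by_contra hcon
      exact hp (hprev.mpr (by omega))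
    have hlb : (lastv == 1) = false := by simp [hl1]
    have hpb : (prev == 1) = false := by simp [hp]
    simp only [hx, beq_self_eq_true, hlb, hpb, Bool.false_and, Bool.and_false,
      Bool.false_eq_true, if_false, Bool.not_false, Bool.true_and, if_true]
    refine ⟨by omega, by simp, by omega, by omega, by push_cast; omega, by omega, ?_, ?_, ?_⟩
    · intro h1
      have hz : g = 0 := by omega
      have := hg0 hz
      left
      push_cast; omega
    · intro h2
      by_cases hgz : g = 0
      · have := hg0 hgz; omega
      · by_cases hgone : g = 1
        · rcases hg1 hgone with ⟨hc1, hm0⟩ | hmeq <;> push_cast at * <;> omega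
        · have := hg2 (by omega); push_cast at *; omega
    · intro _
      refine ⟨fun hle => ?_, by push_cast; omega⟩
      have hz : g = 0 := by omega
      have := hg0 hz
      omega
  · -- x ≠ 1, prev = 1
    have hl1 : lastv = 1 := hlast.mpr hp
    have hxb : (x == 1) = false := by simp [hx]
    simp only [hl1, hxb, hx, Bool.true_and, Bool.and_false, Bool.false_and, Bool.false_eq_true, if_false]
    refine ⟨by omega, by simp [hx], by omega, by omega, by omega, ?_, ?_, ?_, by omega⟩
    · intro h0; have := hg0 h0; omega
    · intro h1; rcases hg1 h1 with ⟨hc1, hm0⟩ | hmeq <;> [left; right] <;> omega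
    · intro h2; have := hg2 h2; omega
  · -- x ≠ 1, prev ≠ 1
    have hl1 : lastv ≠ 1 := fun h => hp (hlast.mp h)
    have hxb : (x == 1) = false := by simp [hx]
    have hlb : (lastv == 1) = false := by simp [hl1]
    simp only [hxb, hlb, hx, Bool.false_and, Bool.false_eq_true, if_false]
    refine ⟨by omega, by simp [hx], by omega, by omega, by omega, ?_, ?_, ?_, by omega⟩
    · intro h0; have := hg0 h0; omega
    · intro h1; rcases hg1 h1 with ⟨hc1, hm0⟩ | hmeq <;> [left; right] <;> omega
    · intro h2; have := hg2 h2; omega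

lemma count_snoc (l : List Int) (x : Int) :
    (l ++ [x]).count 1 = l.count 1 + (if x = 1 then 1 else 0) := by
  by_cases hx : x = 1 <;> simp [List.count_append, hx]

lemma inv_holds (l : List Int) :
    InvP (afold l).1 (afold l).2 (bfold l).1 (bfold l).2 (l.count 1) (trailOnes l) := by
  induction l using List.reverseRecOn with
  | nil =>
    unfold InvP
    rw [afold_nil]
    norm_num [bfold, trailOnes]
  | append_singleton l x ih =>
    rw [count_snoc, trailOnes_append, bfold_append]
    rcases eq_or_ne l [] with rfl | hl
    · rw [show ([] : List Int) ++ [x] = [x] from rfl, afold_singleton]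
      unfold InvP at ih ⊢
      by_cases hx : x = 1 <;>
        simp only [afold_nil, bfold, List.foldl_nil, List.count_nil, trailOnes,
          List.reverse_nil, List.takeWhile_nil, List.length_nil, hx] at ih ⊢ <;>
        simp [hx]
    · rw [afold_append l x hl]
      have hlast : l.getLast hl = 1 ↔ (bfold l).2 = 1 :=
        (getLast_eq_one_iff_trail l hl).trans ih.2.1.symm
      exact InvP_step _ _ _ _ _ _ _ _ hlast ih

theorem solve_eq_solve_alt (nums : List Int) : solve nums = solve_alt nums := by
  rw [solve_eq, solve_alt_eq]
  obtain ⟨hc, hprev, ht, hg0le, hgle, hg0, hg1, hg2, htp⟩ := inv_holds nums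
  by_cases hB : (bfold nums).1 ≤ 1
  · rcases eq_or_lt_of_le hg0le with hz | hpos
    · obtain ⟨hcnt, hmc⟩ := hg0 hz.symm
      simp [hB, hcnt, hmc]
    · have h1 : (bfold nums).1 = 1 := by omega
      rcases hg1 h1 with ⟨hcnt1, _⟩ | hmceq
      · simp [hB, hcnt1]
      · simp [hB, hmceq]
  · obtain ⟨hlt, hcnt2⟩ := hg2 (by omega)
    have hne : nums.count 1 ≠ 1 := by omega
    have hmcne : (afold nums).2 ≠ (nums.count 1 : Int) := by omega
    simp [hB, hne, hmcne]

-- ===== VERDICT (by name: the statement is the Claim_ definition above) =====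
theorem solve_spec : Claim_equal_solve := by
  intro nums _
  unfold Spec_solve
  exact solve_eq_solve_alt nums
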